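-- pv_equiv track=rewrite | github.com/ramnath-1998/Jinta-Project | jinta_project.py | calculate_length_of_product
-- ===== SOURCE A (Python) =====
-- def calculate_length_of_product(multiplier_array,multiplicand_array,shift):
--     for i in range(0,len(multiplier_array)):
--         if i == 0 :
--             result = len(multiplicand_array)
--         else :
--             result = result + shift
--     result = result + shift
--     return result
-- ===== SOURCE B (Python) =====
-- def calculate_length_of_product(multiplier_array, multiplicand_array, shift):
--     # closed form: the loop sets result=len(multiplicand) once, then adds shift
--     # len(multiplier)-1 times, and one more shift is added after the loop.
--     return len(multiplicand_array) + shift * len(multiplier_array)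
-- ===== Notes on version B (the rewrite author's own statement) =====
-- stated objective: faster
-- what changed: Replaces the O(n) loop over the multiplier array with the closed form len(multiplicand_array) + shift*len(multiplier_array).
import Mathlib
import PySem

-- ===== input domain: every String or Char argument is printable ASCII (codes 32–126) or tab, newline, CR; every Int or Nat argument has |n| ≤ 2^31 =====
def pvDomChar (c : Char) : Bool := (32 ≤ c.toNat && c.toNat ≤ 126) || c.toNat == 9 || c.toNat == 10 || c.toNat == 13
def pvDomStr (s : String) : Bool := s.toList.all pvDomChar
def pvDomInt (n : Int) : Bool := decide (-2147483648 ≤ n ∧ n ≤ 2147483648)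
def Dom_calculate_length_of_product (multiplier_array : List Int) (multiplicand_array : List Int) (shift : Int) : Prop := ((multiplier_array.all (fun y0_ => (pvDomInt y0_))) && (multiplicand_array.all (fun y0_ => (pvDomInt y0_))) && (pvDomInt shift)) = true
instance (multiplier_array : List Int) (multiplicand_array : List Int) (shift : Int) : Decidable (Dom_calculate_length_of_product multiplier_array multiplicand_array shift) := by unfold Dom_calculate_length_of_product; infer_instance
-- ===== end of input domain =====

-- B replaces A's O(n) loop with the closed form len(multiplicand) + shift*len(multiplier); asymptotically faster.
-- ===== PORT A =====
-- Loop over range(0, len(multiplier_array)); 'result' is unassigned before the loop, so the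
-- fold starts from a junk value 0 that is overwritten at i = 0 (Pre_ requires the loop runs).
def calculate_length_of_product (multiplier_array : List Int) (multiplicand_array : List Int) (shift : Int) : Int :=
  let result := (PySem.List.pyRange 0 (PySem.List.len multiplier_array) 1).foldl
    (fun result i => if i == 0 then PySem.List.len multiplicand_array else result + shift) 0
  result + shift

-- ===== PORT B =====
def calculate_length_of_product_alt (multiplier_array : List Int) (multiplicand_array : List Int) (shift : Int) : Int :=
  PySem.List.len multiplicand_array + shift * PySem.List.len multiplier_array

-- ===== PRECONDITION & SPEC =====
-- A raises UnboundLocalError when multiplier_array is empty ('result' is never assigned).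
def Pre_calculate_length_of_product (multiplier_array : List Int) (multiplicand_array : List Int) (shift : Int) : Prop := multiplier_array ≠ []
instance (multiplier_array : List Int) (multiplicand_array : List Int) (shift : Int) : Decidable (Pre_calculate_length_of_product multiplier_array multiplicand_array shift) := by unfold Pre_calculate_length_of_product; infer_instance
def pvWitness_calculate_length_of_product : List Int × List Int × Int := ([1, 2], [3], 4)

def Spec_calculate_length_of_product (multiplier_array : List Int) (multiplicand_array : List Int) (shift : Int) (out : Int) : Prop := out = calculate_length_of_product_alt multiplier_array multiplicand_array shift
instance (multiplier_array : List Int) (multiplicand_array : List Int) (shift : Int) (out : Int) : Decidable (Spec_calculate_length_of_product multiplier_array multiplicand_array shift out) := by unfold Spec_calculate_length_of_product; infer_instance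

-- ===== CLAIM (what is proved, stated in full; the proofs are below) =====
def Claim_equal_calculate_length_of_product : Prop := ∀ (multiplier_array : List Int) (multiplicand_array : List Int) (shift : Int), Dom_calculate_length_of_product multiplier_array multiplicand_array shift → Pre_calculate_length_of_product multiplier_array multiplicand_array shift → Spec_calculate_length_of_product multiplier_array multiplicand_array shift (calculate_length_of_product multiplier_array multiplicand_array shift)

-- ===== LEMMAS AND PROOFS =====

-- ===== VERDICT (by name: the statement is the Claim_ definition above) =====
-- loop invariant: after iterating over range(0, n) with n ≥ 1 the accumulator is mc + (n-1)*shift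
theorem fold_range_val (mc shift : Int) (n : Nat) (hn : 1 ≤ n) :
    (PySem.List.pyRange 0 (n : Int) 1).foldl
      (fun result i => if i == 0 then mc else result + shift) 0 = mc + ((n : Int) - 1) * shift := by
  induction n with
  | zero => omega
  | succ m ih =>
    rcases Nat.eq_or_lt_of_le hn with h | h
    · rw [← h, show PySem.List.pyRange 0 ((1:Nat):Int) 1 = [0] by decide]; simp
    · have hm : 1 ≤ m := by omega
      have : ((m : Int) + 1) = (m : Int) + 1 := rfl
      rw [show ((m + 1 : Nat) : Int) = (m : Int) + 1 by push_cast; ring,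
        PySem.List.pyRange_one_succ_right (by positivity), List.foldl_append, ih hm]
      have hm0 : ¬ ((m : Int) == 0) = true := by simp; omega
      simp [List.foldl, hm0]
      ring

theorem calculate_length_of_product_spec : Claim_equal_calculate_length_of_product := by
  intro mr mc shift _ hpre
  unfold Spec_calculate_length_of_product calculate_length_of_product calculate_length_of_product_alt
  have hn : 1 ≤ mr.length := List.length_pos_iff.mpr hpre
  simp only [PySem.List.len]
  rw [fold_range_val _ _ _ hn]
  ring
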